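-- pv_equiv track=rewrite | github.com/wiknwo/leetcode | max_odd_decomposition.py | solution
-- ===== SOURCE A (Python) =====
-- def solution(N):
--     # write your code in Python 3.6
--     max_odd_decomp_of_n = []
--     # Handling special cases first
--     if N == 2:
--         return max_odd_decomp_of_n
--     elif N == 1 or N == 3 or N == 5 or N == 7:
--         max_odd_decomp_of_n.append(N)
--         return max_odd_decomp_of_n
--     else:
--         runningsum, count, i = 0, 0, 1
--         # Loop through and compute odd number divisors
--         while (runningsum + i) < N:
--             max_odd_decomp_of_n.append(i)
--             count += 1
--             runningsum += i
--             i += 2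
--         start, r = 0, N - runningsum
--         if r % 2 == 0:
--             max_odd_decomp_of_n[count - 1] += r
--         elif r > max_odd_decomp_of_n[count - 1]:
--             max_odd_decomp_of_n.append(r)
--             count += 1
--         else:
--             start = 1
--             max_odd_decomp_of_n[count - 1] += r + 1
--         return max_odd_decomp_of_n
-- ===== SOURCE B (Python) =====
-- def solution(N):
--     if N == 2:
--         return []
--     if N in (1, 3, 5, 7):
--         return [N]
--     # largest k with k*k < N, found by binary search (invariant: lo*lo < N <= hi*hi)
--     lo, hi = 1, N
--     while hi - lo > 1:
--         mid = (lo + hi) // 2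
--         if mid * mid < N:
--             lo = mid
--         else:
--             hi = mid
--     k = lo
--     odds = list(range(1, 2 * k, 2))
--     r = N - k * k
--     if r % 2 == 0:
--         odds[-1] += r
--     elif r > odds[-1]:
--         odds.append(r)
--     else:
--         odds[-1] += r + 1
--     return odds
-- ===== Notes on version B (the rewrite author's own statement) =====
-- stated objective: alternative
-- what changed: A accumulates odd addends one by one until their running sum reaches N; B binary-searches for the count k (largest k with k*k < N), builds the odds list 1..2k-1 directly with range, and applies the same final remainder adjustment.
-- outside the precondition, e.g. on solution(0): A raises IndexError, B returns [1]; on solution(-1): A raises IndexError, B returns [-1]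
import Mathlib
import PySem

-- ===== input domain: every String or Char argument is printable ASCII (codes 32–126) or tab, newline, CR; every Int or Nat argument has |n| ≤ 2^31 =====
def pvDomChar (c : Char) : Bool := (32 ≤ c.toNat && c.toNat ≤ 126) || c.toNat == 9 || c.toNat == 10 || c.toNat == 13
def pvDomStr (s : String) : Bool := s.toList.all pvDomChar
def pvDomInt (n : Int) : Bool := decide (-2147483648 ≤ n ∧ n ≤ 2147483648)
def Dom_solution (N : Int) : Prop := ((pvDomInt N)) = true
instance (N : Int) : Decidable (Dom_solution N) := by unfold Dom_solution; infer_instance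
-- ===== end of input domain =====

-- B replaces A's accumulate-odds-until-the-sum-reaches-N loop by a binary search for the
-- count k (the largest k with k*k < N) and builds the odds list directly; objective: alternative.

-- ===== PORT A =====
-- A's while loop; fuel N.toNat is always sufficient since runningsum grows by i ≥ 1 each pass.
def solutionLoop (N : Int) : Nat → List Int → Int → Int → Int → (List Int × Int × Int)
  | 0, acc, rs, count, _ => (acc, rs, count)
  | fuel+1, acc, rs, count, i =>
    if rs + i < N then solutionLoop N fuel (acc ++ [i]) (rs + i) (count + 1) (i + 2)
    else (acc, rs, count)

def solution (N : Int) : List Int :=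
  if N = 2 then []
  else if N = 1 ∨ N = 3 ∨ N = 5 ∨ N = 7 then [N]
  else
    let st := solutionLoop N N.toNat [] 0 0 1
    let acc := st.1
    let rs := st.2.1
    let count := st.2.2
    let r := N - rs
    if PySem.Int.mod r 2 = 0 then
      PySem.List.pySetD acc (count - 1) (PySem.List.pyGetD acc (count - 1) 0 + r)
    else if r > PySem.List.pyGetD acc (count - 1) 0 then acc ++ [r]
    else PySem.List.pySetD acc (count - 1) (PySem.List.pyGetD acc (count - 1) 0 + r + 1)

-- ===== PORT B =====
-- the binary search of Source B (invariant lo*lo < N ≤ hi*hi); terminates because mid is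
-- strictly between lo and hi whenever hi - lo > 1
def bsearchK (N lo hi : Int) : Int :=
  if hi - lo > 1 then
    let mid := PySem.Int.floordiv (lo + hi) 2
    if mid * mid < N then bsearchK N mid hi else bsearchK N lo mid
  else lo
termination_by (hi - lo).toNat
decreasing_by
  · have hm : PySem.Int.floordiv (lo + hi) 2 = (lo + hi) / 2 :=
      PySem.Int.floordiv_eq_ediv_of_pos (by omega)
    simp only [mid] at *
    omega
  · have hm : PySem.Int.floordiv (lo + hi) 2 = (lo + hi) / 2 :=
      PySem.Int.floordiv_eq_ediv_of_pos (by omega)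
    simp only [mid] at *
    omega

def solution_alt (N : Int) : List Int :=
  if N = 2 then []
  else if N = 1 ∨ N = 3 ∨ N = 5 ∨ N = 7 then [N]
  else
    let k := bsearchK N 1 N
    let odds := PySem.List.pyRange 1 (2 * k) 2
    let r := N - k * k
    if PySem.Int.mod r 2 = 0 then
      PySem.List.pySetD odds (-1) (PySem.List.pyGetD odds (-1) 0 + r)
    else if r > PySem.List.pyGetD odds (-1) 0 then odds ++ [r]
    else PySem.List.pySetD odds (-1) (PySem.List.pyGetD odds (-1) 0 + r + 1)

-- ===== PRECONDITION & SPEC =====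
-- Pre_ excludes N ≤ 0, on which A raises IndexError (its loop body never runs and it then
-- reads max_odd_decomp_of_n[-1] of the empty list).
def Pre_solution (N : Int) : Prop := 1 ≤ N
instance (N : Int) : Decidable (Pre_solution N) := by unfold Pre_solution; infer_instance
def pvWitness_solution : Int := (12)

def Spec_solution (N : Int) (out : List Int) : Prop := out = solution_alt N
instance (N : Int) (out : List Int) : Decidable (Spec_solution N out) := by unfold Spec_solution; infer_instance

-- ===== CLAIM (what is proved, stated in full; the proofs are below) =====
def Claim_equal_solution : Prop := ∀ (N : Int), Dom_solution N → Pre_solution N → Spec_solution N (solution N)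

-- ===== LEMMAS AND PROOFS =====

-- the odds list 1, 3, …, 2j-1
def oddsL (j : Nat) : List Int := (List.range j).map (fun (t : Nat) => 2 * (t : Int) + 1)

theorem pyRange_odds (k : Nat) : PySem.List.pyRange 1 (2 * (k : Int)) 2 = oddsL k := by
  rw [PySem.List.pyRange_of_pos 1 (2 * (k : Int)) (by norm_num)]
  unfold oddsL
  rcases Nat.eq_zero_or_pos k with h | h
  · subst h; simp
  · have h1 : (1 : Int) < 2 * (k : Int) := by omega
    rw [if_pos h1]
    have : ((2 * (k : Int) - 1 + 2 - 1) / 2).toNat = k := by omega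
    rw [this]
    apply List.map_congr_left; intro t _; ring

theorem length_oddsL (k : Nat) : (oddsL k).length = k := by simp [oddsL]

theorem getElem_oddsL (k t : Nat) (ht : t < (oddsL k).length) :
    (oddsL k)[t] = 2 * (t : Int) + 1 := by
  simp [oddsL]

theorem pyGetD_oddsL_last (k : Nat) (hk : 1 ≤ k) (d : Int) :
    PySem.List.pyGetD (oddsL k) (-1) d = 2 * (k : Int) - 1 ∧
    PySem.List.pyGetD (oddsL k) ((k : Int) - 1) d = 2 * (k : Int) - 1 := by
  have hlen := length_oddsL k
  have hget : (oddsL k)[k-1]'(by omega) = 2 * (k : Int) - 1 := by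
    rw [getElem_oddsL k (k-1) (by omega)]; omega
  constructor
  · simp [PySem.List.pyGetD, PySem.List.pyGet?_neg_one]
    rw [List.getLast?_eq_getElem?, hlen,
      List.getElem?_eq_getElem (by omega : k - 1 < (oddsL k).length), hget]
    rfl
  · have : ((k : Int) - 1) = ((k - 1 : Nat) : Int) := by omega
    rw [this]
    simp [PySem.List.pyGetD]
    rw [List.getElem?_eq_getElem (by omega : k - 1 < (oddsL k).length), hget]
    rfl

theorem pySetD_oddsL_last (k : Nat) (hk : 1 ≤ k) (v : Int) :
    PySem.List.pySetD (oddsL k) (-1) v = PySem.List.pySetD (oddsL k) ((k : Int) - 1) v := by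
  have hlen := length_oddsL k
  have h2 : PySem.List.pySetD (oddsL k) ((k : Int) - 1) v = (oddsL k).set (k-1) v := by
    rw [PySem.List.pySetD_of_nonneg _ _ (by omega)]
    congr 1; omega
  rw [h2]
  simp [PySem.List.pySetD, PySem.List.pySet?, PySem.List.pyIdx?, hlen]
  rw [if_pos hk]
  rfl

theorem bsearchK_spec : ∀ (m : Nat) (N lo hi : Int), (hi - lo).toNat ≤ m →
    1 ≤ lo → lo < hi → lo * lo < N → N ≤ hi * hi →
    1 ≤ bsearchK N lo hi ∧ bsearchK N lo hi * bsearchK N lo hi < N ∧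
      N ≤ (bsearchK N lo hi + 1) * (bsearchK N lo hi + 1) := by
  intro m
  induction m with
  | zero => intro N lo hi hm h1 hlt _ _; omega
  | succ m ih =>
    intro N lo hi hm h1 hlt hloN hNhi
    rw [bsearchK]
    by_cases hgap : hi - lo > 1
    · rw [if_pos hgap]
      have hmid : PySem.Int.floordiv (lo + hi) 2 = (lo + hi) / 2 :=
        PySem.Int.floordiv_eq_ediv_of_pos (by omega)
      set mid := PySem.Int.floordiv (lo + hi) 2 with hmdef
      have hb : lo < mid ∧ mid < hi := by omega
      by_cases hc : mid * mid < N
      · rw [if_pos hc]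
        exact ih N mid hi (by omega) (by omega) (by omega) hc hNhi
      · rw [if_neg hc]
        exact ih N lo mid (by omega) h1 (by omega) hloN (by omega)
    · rw [if_neg hgap]
      have : hi = lo + 1 := by omega
      subst this
      exact ⟨h1, hloN, hNhi⟩

theorem oddsL_succ (j : Nat) : oddsL j ++ [2 * (j : Int) + 1] = oddsL (j + 1) := by
  simp [oddsL, List.range_succ]

theorem loopA_spec (N : Int) (k : Nat)
    (hkN : (k : Int) * (k : Int) < N) (hN : N ≤ ((k : Int) + 1) * ((k : Int) + 1)) :
    ∀ (fuel j : Nat), j ≤ k → k - j ≤ fuel →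
      solutionLoop N fuel (oddsL j) ((j : Int) * (j : Int)) (j : Int) (2 * (j : Int) + 1)
        = (oddsL k, (k : Int) * (k : Int), (k : Int)) := by
  intro fuel
  induction fuel with
  | zero =>
    intro j hj hf
    have : j = k := by omega
    subst this
    rfl
  | succ fuel ih =>
    intro j hj hf
    rcases Nat.lt_or_ge j k with hlt | hge
    · have hcond : (j : Int) * (j : Int) + (2 * (j : Int) + 1) < N := by
        have h1 : ((j : Int) + 1) * ((j : Int) + 1) ≤ (k : Int) * (k : Int) := by
          have : (j : Int) + 1 ≤ (k : Int) := by exact_mod_cast hlt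
          nlinarith
        nlinarith
      rw [solutionLoop, if_pos hcond, oddsL_succ]
      have e1 : (j : Int) * (j : Int) + (2 * (j : Int) + 1) = ((j+1 : Nat) : Int) * ((j+1 : Nat) : Int) := by push_cast; ring
      have e2 : (j : Int) + 1 = ((j+1 : Nat) : Int) := by push_cast; ring
      have e3 : 2 * (j : Int) + 1 + 2 = 2 * ((j+1 : Nat) : Int) + 1 := by push_cast; ring
      rw [e1, e2, e3]
      exact ih (j+1) (by omega) (by omega)
    · have : j = k := by omega
      subst this
      have hcond : ¬ ((j : Int) * (j : Int) + (2 * (j : Int) + 1) < N) := by nlinarith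
      rw [solutionLoop, if_neg hcond]

-- ===== VERDICT (by name: the statement is the Claim_ definition above) =====
theorem solution_spec : Claim_equal_solution := by
  intro N _ hPre
  unfold Pre_solution at hPre
  unfold Spec_solution solution solution_alt
  by_cases h2 : N = 2
  · simp [h2]
  rw [if_neg h2, if_neg h2]
  by_cases hs : N = 1 ∨ N = 3 ∨ N = 5 ∨ N = 7
  · rw [if_pos hs, if_pos hs]
  rw [if_neg hs, if_neg hs]
  have hN4 : 4 ≤ N := by omega
  obtain ⟨hk1, hk2, hk3⟩ := bsearchK_spec (N - 1).toNat N 1 N (by omega) (by omega)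
    (by omega) (by omega) (by nlinarith)
  set k' := bsearchK N 1 N with hk'def
  have hkk : ((k'.toNat : Int)) = k' := Int.toNat_of_nonneg (by omega)
  set k := k'.toNat with hkdef
  have hfuel : k ≤ N.toNat := by
    have : k' ≤ k' * k' := by nlinarith
    omega
  have hloop := loopA_spec N k (by rw [hkk]; exact hk2) (by rw [hkk]; exact hk3)
    N.toNat 0 (by omega) (by omega)
  norm_num [oddsL] at hloop
  have hk1' : 1 ≤ k := by omega
  obtain ⟨hgneg, hgpos⟩ := pyGetD_oddsL_last k hk1' 0
  have hset := pySetD_oddsL_last k hk1'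
  simp only [oddsL] at hgneg hgpos hset
  simp only [hloop, ← hkk, pyRange_odds, oddsL, hgneg, hgpos, hset]
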